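-- pv_equiv track=rewrite | github.com/byoutsey/McGuire-Lab-Amplicon-Analysis-Pipeline | orient.py | despace
-- ===== SOURCE A (Python) =====
-- def tolerance(t,r,fw):
--     if int(t) >= sum(a != b for a,b in zip(fw, r)):
--         return 0
--
-- def despace(t,l1,s1,l2,s2,fw,rv):
--     """removes spacers an returns properly oriented read and q score lines
--      t is tolerance, l is read line, s is the quality score line
--      returns """
--     win = len(fw + rv)
--     for i in range(win):
--         # defines the size of the serach window
--         seq1 = l1[i:i+len(fw)]
--         # defines the search sequence matching fw length
--         seq2 = l1[i:i+len(rv)]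
--         # defines the search sequence matching rv length
--         if tolerance(t, seq1, fw) == 0:
--             # checks if the search window matches with the given tolerances
--             for x in range(win):
--                 # searches for the rv sequence in the second read
--                 seq3 = l2[x:x+len(rv)]
--                 if tolerance(t, seq3, rv) == 0:
--                     return l1[i:], s1[i:], l2[x:], s2[x:], True
--         elif tolerance(t, seq2, rv) == 0:
--             # checks if the search window matches with the given tolerances
--             for x in range(win):
--                 # searches for the rv sequence in the second read
--                 seq3 = l2[x:x+len(fw)]
--                 if tolerance(t, seq3, fw) == 0:
--                     return l1[i:], s1[i:], l2[x:], s2[x:], False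
--     return l1, s1, l2, s2, None
-- ===== SOURCE B (Python) =====
-- def despace(t, l1, s1, l2, s2, fw, rv):
--     """removes spacers an returns properly oriented read and q score lines
--      t is tolerance, l is read line, s is the quality score line
--      returns """
--     win = len(fw) + len(rv)
--
--     def matches(seq, primer):
--         return int(t) >= sum(a != b for a, b in zip(primer, seq))
--
--     # The l2 scans in A do not depend on the l1 position, so compute them once.
--     pos_rv = next((x for x in range(win) if matches(l2[x:x+len(rv)], rv)), None)
--     pos_fw = next((x for x in range(win) if matches(l2[x:x+len(fw)], fw)), None)
--
--     for i in range(win):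
--         if matches(l1[i:i+len(fw)], fw):
--             if pos_rv is not None:
--                 return l1[i:], s1[i:], l2[pos_rv:], s2[pos_rv:], True
--         elif matches(l1[i:i+len(rv)], rv):
--             if pos_fw is not None:
--                 return l1[i:], s1[i:], l2[pos_fw:], s2[pos_fw:], False
--     return l1, s1, l2, s2, None
-- ===== Notes on version B (the rewrite author's own statement) =====
-- stated objective: alternative
-- what changed: B hoists the two loop-invariant scans of l2 (for rv and for fw) out of A's outer loop, computing each first-match position once, and then makes a single pass over l1, instead of A's rescanning l2 from scratch at every matching l1 position.
import Mathlib
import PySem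

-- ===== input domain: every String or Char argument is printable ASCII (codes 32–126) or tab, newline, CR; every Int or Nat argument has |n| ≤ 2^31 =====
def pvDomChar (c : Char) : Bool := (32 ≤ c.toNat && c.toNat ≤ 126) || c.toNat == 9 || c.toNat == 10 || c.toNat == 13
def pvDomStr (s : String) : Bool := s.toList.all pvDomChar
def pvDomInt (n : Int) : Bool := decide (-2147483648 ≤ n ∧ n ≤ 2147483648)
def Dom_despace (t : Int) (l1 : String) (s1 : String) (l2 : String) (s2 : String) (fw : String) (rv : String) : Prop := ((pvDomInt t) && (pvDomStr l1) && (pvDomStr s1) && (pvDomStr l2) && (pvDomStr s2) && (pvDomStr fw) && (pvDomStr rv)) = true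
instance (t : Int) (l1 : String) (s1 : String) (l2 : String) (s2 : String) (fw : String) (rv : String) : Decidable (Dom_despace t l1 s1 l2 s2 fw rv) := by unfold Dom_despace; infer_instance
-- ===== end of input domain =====

-- B hoists the two loop-invariant scans of l2 out of A's outer loop and replaces the
-- nested rescanning with two precomputed first-match positions and a single pass over l1.

-- ===== PORT A =====
-- sum(a != b for a, b in zip(fw, r))
def pvTolSum (fw r : String) : Int :=
  (fw.toList.zip r.toList).foldl (fun acc p => acc + (if p.1 ≠ p.2 then 1 else 0)) 0

-- tolerance(t, r, fw): returns 0 (some 0) if int(t) >= mismatch sum, else None (none)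
def pyTolerance (t : Int) (r : String) (fw : String) : Option Int :=
  if pvTolSum fw r ≤ t then some 0 else none

-- inner 'for x in range(win)' loop of A, scanning l2 for primer prim
def despaceInnerA (t : Int) (l1 s1 l2 s2 prim : String) (i : Int) (flag : Bool) :
    List Int → Option (String × String × String × String × Option Bool)
  | [] => none
  | x :: xs =>
    if pyTolerance t (PySem.Str.slice l2 (some x) (some (x + PySem.Str.len prim))) prim = some 0 then
      some (PySem.Str.slice l1 (some i) none, PySem.Str.slice s1 (some i) none,
            PySem.Str.slice l2 (some x) none, PySem.Str.slice s2 (some x) none, some flag)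
    else despaceInnerA t l1 s1 l2 s2 prim i flag xs

-- outer 'for i in range(win)' loop of A
def despaceOuterA (t : Int) (l1 s1 l2 s2 fw rv : String) (win : Int) :
    List Int → String × String × String × String × Option Bool
  | [] => (l1, s1, l2, s2, none)
  | i :: is =>
    if pyTolerance t (PySem.Str.slice l1 (some i) (some (i + PySem.Str.len fw))) fw = some 0 then
      match despaceInnerA t l1 s1 l2 s2 rv i true (PySem.List.pyRange 0 win 1) with
      | some r => r
      | none => despaceOuterA t l1 s1 l2 s2 fw rv win is
    else if pyTolerance t (PySem.Str.slice l1 (some i) (some (i + PySem.Str.len rv))) rv = some 0 then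
      match despaceInnerA t l1 s1 l2 s2 fw i false (PySem.List.pyRange 0 win 1) with
      | some r => r
      | none => despaceOuterA t l1 s1 l2 s2 fw rv win is
    else despaceOuterA t l1 s1 l2 s2 fw rv win is

def despace (t : Int) (l1 : String) (s1 : String) (l2 : String) (s2 : String) (fw : String) (rv : String) : String × String × String × String × Option Bool :=
  let win : Int := PySem.Chars.len (fw.toList ++ rv.toList)   -- len(fw + rv)
  despaceOuterA t l1 s1 l2 s2 fw rv win (PySem.List.pyRange 0 win 1)

-- ===== PORT B =====
-- matches(seq, primer): int(t) >= sum(a != b for a, b in zip(primer, seq))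
def pvMatchesB (t : Int) (seq primer : String) : Bool :=
  decide ((primer.toList.zip seq.toList).foldl
            (fun acc p => acc + (if p.1 ≠ p.2 then 1 else 0)) (0 : Int) ≤ t)

-- next((x for x in range(win) if matches(l2[x:x+len(primer)], primer)), None)
def pvFirstPosB (t : Int) (l2 primer : String) : List Int → Option Int
  | [] => none
  | x :: xs =>
    if pvMatchesB t (PySem.Str.slice l2 (some x) (some (x + PySem.Str.len primer))) primer then
      some x
    else pvFirstPosB t l2 primer xs

-- the single pass over l1, with the precomputed l2 positions
def despaceLoopB (t : Int) (l1 s1 l2 s2 fw rv : String) (posRv posFw : Option Int) :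
    List Int → String × String × String × String × Option Bool
  | [] => (l1, s1, l2, s2, none)
  | i :: is =>
    if pvMatchesB t (PySem.Str.slice l1 (some i) (some (i + PySem.Str.len fw))) fw then
      match posRv with
      | some x =>
        (PySem.Str.slice l1 (some i) none, PySem.Str.slice s1 (some i) none,
         PySem.Str.slice l2 (some x) none, PySem.Str.slice s2 (some x) none, some true)
      | none => despaceLoopB t l1 s1 l2 s2 fw rv posRv posFw is
    else if pvMatchesB t (PySem.Str.slice l1 (some i) (some (i + PySem.Str.len rv))) rv then
      match posFw with
      | some x =>
        (PySem.Str.slice l1 (some i) none, PySem.Str.slice s1 (some i) none,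
         PySem.Str.slice l2 (some x) none, PySem.Str.slice s2 (some x) none, some false)
      | none => despaceLoopB t l1 s1 l2 s2 fw rv posRv posFw is
    else despaceLoopB t l1 s1 l2 s2 fw rv posRv posFw is

def despace_alt (t : Int) (l1 : String) (s1 : String) (l2 : String) (s2 : String) (fw : String) (rv : String) : String × String × String × String × Option Bool :=
  let win : Int := PySem.Str.len fw + PySem.Str.len rv
  let posRv := pvFirstPosB t l2 rv (PySem.List.pyRange 0 win 1)
  let posFw := pvFirstPosB t l2 fw (PySem.List.pyRange 0 win 1)
  despaceLoopB t l1 s1 l2 s2 fw rv posRv posFw (PySem.List.pyRange 0 win 1)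

-- ===== PRECONDITION & SPEC =====
def Spec_despace (t : Int) (l1 : String) (s1 : String) (l2 : String) (s2 : String) (fw : String) (rv : String) (out : String × String × String × String × Option Bool) : Prop := out = despace_alt t l1 s1 l2 s2 fw rv
instance (t : Int) (l1 : String) (s1 : String) (l2 : String) (s2 : String) (fw : String) (rv : String) (out : String × String × String × String × Option Bool) : Decidable (Spec_despace t l1 s1 l2 s2 fw rv out) := by unfold Spec_despace; infer_instance

-- ===== CLAIM (what is proved, stated in full; the proofs are below) =====
def Claim_equal_despace : Prop := ∀ (t : Int) (l1 : String) (s1 : String) (l2 : String) (s2 : String) (fw : String) (rv : String), Dom_despace t l1 s1 l2 s2 fw rv → Spec_despace t l1 s1 l2 s2 fw rv (despace t l1 s1 l2 s2 fw rv)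

-- ===== LEMMAS AND PROOFS =====

-- A's 'tolerance(...) == 0' test is B's boolean matches test.
theorem pyTolerance_eq_some_zero_iff (t : Int) (r p : String) :
    pyTolerance t r p = some 0 ↔ pvMatchesB t r p = true := by
  unfold pyTolerance pvMatchesB pvTolSum
  split_ifs with h <;> simp_all

-- A's inner scan of l2 is B's first-position scan, mapped to the returned tuple.
theorem despaceInnerA_eq (t : Int) (l1 s1 l2 s2 prim : String) (i : Int) (flag : Bool)
    (xs : List Int) :
    despaceInnerA t l1 s1 l2 s2 prim i flag xs =
      (pvFirstPosB t l2 prim xs).map (fun x =>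
        (PySem.Str.slice l1 (some i) none, PySem.Str.slice s1 (some i) none,
         PySem.Str.slice l2 (some x) none, PySem.Str.slice s2 (some x) none, some flag)) := by
  induction xs with
  | nil => rfl
  | cons x xs ih =>
    simp only [despaceInnerA, pvFirstPosB]
    by_cases h : pvMatchesB t (PySem.Str.slice l2 (some x) (some (x + PySem.Str.len prim))) prim = true
    · rw [if_pos ((pyTolerance_eq_some_zero_iff _ _ _).mpr h), if_pos h]
      rfl
    · rw [if_neg (fun hc => h ((pyTolerance_eq_some_zero_iff _ _ _).mp hc)), if_neg h, ih]

-- A's outer loop equals B's single pass once the l2 positions are precomputed.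
theorem despaceOuterA_eq (t : Int) (l1 s1 l2 s2 fw rv : String) (win : Int) (is : List Int) :
    despaceOuterA t l1 s1 l2 s2 fw rv win is =
      despaceLoopB t l1 s1 l2 s2 fw rv
        (pvFirstPosB t l2 rv (PySem.List.pyRange 0 win 1))
        (pvFirstPosB t l2 fw (PySem.List.pyRange 0 win 1)) is := by
  induction is with
  | nil => rfl
  | cons i is ih =>
    simp only [despaceOuterA, despaceLoopB]
    by_cases h1 : pvMatchesB t (PySem.Str.slice l1 (some i) (some (i + PySem.Str.len fw))) fw = true
    · rw [if_pos ((pyTolerance_eq_some_zero_iff _ _ _).mpr h1), if_pos h1,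
        despaceInnerA_eq]
      cases hr : pvFirstPosB t l2 rv (PySem.List.pyRange 0 win 1) with
      | none => rw [hr] at ih; simp only [Option.map_none]; exact ih
      | some x => rfl
    · rw [if_neg (fun hc => h1 ((pyTolerance_eq_some_zero_iff _ _ _).mp hc)), if_neg h1]
      by_cases h2 : pvMatchesB t (PySem.Str.slice l1 (some i) (some (i + PySem.Str.len rv))) rv = true
      · rw [if_pos ((pyTolerance_eq_some_zero_iff _ _ _).mpr h2), if_pos h2,
          despaceInnerA_eq]
        cases hf : pvFirstPosB t l2 fw (PySem.List.pyRange 0 win 1) with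
        | none => rw [hf] at ih; simp only [Option.map_none]; exact ih
        | some x => rfl
      · rw [if_neg (fun hc => h2 ((pyTolerance_eq_some_zero_iff _ _ _).mp hc)), if_neg h2]
        exact ih

theorem win_eq (fw rv : String) :
    PySem.Chars.len (fw.toList ++ rv.toList) = PySem.Str.len fw + PySem.Str.len rv := by
  simp [PySem.Chars.len_eq, PySem.Str.len]

-- ===== VERDICT (by name: the statement is the Claim_ definition above) =====
theorem despace_spec : Claim_equal_despace := by
  intro t l1 s1 l2 s2 fw rv _
  unfold Spec_despace despace despace_alt
  rw [win_eq]
  exact despaceOuterA_eq t l1 s1 l2 s2 fw rv _ _
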